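-- pv_equiv track=rewrite | github.com/dreamdev-MYU/advanced_python- | darslar/vazifalar/vazifa_5/exercise2.py | str_difference
-- ===== SOURCE A (Python) =====
-- def str_difference(my_text, my_text1):
--     new = []
--     min_length = min(len(my_text), len(my_text1))
--     for i in range(min_length):
--         if my_text[i] != my_text1[i]:
--             new.append(my_text[i])
--     if len(my_text) > len(my_text1):
--         new.extend(my_text[min_length:])
--     elif len(my_text1) > len(my_text):
--         new.extend(my_text1[min_length:])
--
--     return ''.join(new)
-- ===== SOURCE B (Python) =====
-- def str_difference(my_text, my_text1):
--     n, m = len(my_text), len(my_text1)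
--     out = []
--     for i in range(max(n, m)):
--         a = my_text[i] if i < n else None
--         b = my_text1[i] if i < m else None
--         if a != b:
--             out.append(a if a is not None else b)
--     return ''.join(out)
-- ===== Notes on version B (the rewrite author's own statement) =====
-- stated objective: alternative
-- what changed: One pass over range(max(len, len)) with None padding (a manual zip_longest) replaces the min-length loop plus the two separate elif/extend tail branches.
import Mathlib
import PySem

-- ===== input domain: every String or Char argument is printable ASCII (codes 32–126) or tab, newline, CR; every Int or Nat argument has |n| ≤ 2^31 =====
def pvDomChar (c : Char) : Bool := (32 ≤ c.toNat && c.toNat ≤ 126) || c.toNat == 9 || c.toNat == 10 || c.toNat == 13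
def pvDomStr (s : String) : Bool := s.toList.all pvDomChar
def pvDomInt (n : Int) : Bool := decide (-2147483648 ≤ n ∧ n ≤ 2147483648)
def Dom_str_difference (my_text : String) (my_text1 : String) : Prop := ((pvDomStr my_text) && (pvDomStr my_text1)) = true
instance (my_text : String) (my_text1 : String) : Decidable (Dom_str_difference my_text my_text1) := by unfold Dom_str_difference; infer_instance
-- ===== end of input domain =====

-- B replaces A's min-length mismatch loop plus the two elif/extend tail branches by one padded
-- (zip_longest-style) pass over range(max(len, len)); same cost, different decomposition.

-- ===== PORT A =====
def str_difference (my_text : String) (my_text1 : String) : String :=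
  let t := my_text.toList
  let t1 := my_text1.toList
  let min_length := min t.length t1.length
  -- for i in range(min_length): if my_text[i] != my_text1[i]: new.append(my_text[i])
  let new := (PySem.List.pyRange 0 (min_length : Int) 1).foldl
    (fun acc i =>
      if PySem.List.pyGetD t i ' ' ≠ PySem.List.pyGetD t1 i ' ' then
        acc ++ [PySem.List.pyGetD t i ' ']
      else acc) []
  -- the two elif extend branches: my_text[min_length:] / my_text1[min_length:]
  let new :=
    if t.length > t1.length then new ++ PySem.List.slice t (some (min_length : Int)) none
    else if t1.length > t.length then new ++ PySem.List.slice t1 (some (min_length : Int)) none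
    else new
  String.ofList new   -- ''.join(new), new being a list of single chars

-- ===== PORT B =====
def str_difference_alt (my_text : String) (my_text1 : String) : String :=
  let t := my_text.toList
  let t1 := my_text1.toList
  let n := t.length
  let m := t1.length
  -- for i in range(max(n, m)): pad with None past each end, collect the differing char
  let out := (PySem.List.pyRange 0 (max n m : Int) 1).foldl
    (fun acc i =>
      let a : Option Char := if i < (n : Int) then some (PySem.List.pyGetD t i ' ') else none
      let b : Option Char := if i < (m : Int) then some (PySem.List.pyGetD t1 i ' ') else none
      if a ≠ b then acc ++ [a.getD (b.getD ' ')] else acc) []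
  String.ofList out   -- ''.join(out)

-- ===== PRECONDITION & SPEC =====
def Spec_str_difference (my_text : String) (my_text1 : String) (out : String) : Prop := out = str_difference_alt my_text my_text1
instance (my_text : String) (my_text1 : String) (out : String) : Decidable (Spec_str_difference my_text my_text1 out) := by unfold Spec_str_difference; infer_instance

-- ===== CLAIM (what is proved, stated in full; the proofs are below) =====
def Claim_equal_str_difference : Prop := ∀ (my_text : String) (my_text1 : String), Dom_str_difference my_text my_text1 → Spec_str_difference my_text my_text1 (str_difference my_text my_text1)

-- ===== LEMMAS AND PROOFS =====

-- the common normal form both loops compute: mismatched chars of the overlap, then the longer tail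
def pvFdiff : List Char → List Char → List Char
  | [], bs => bs
  | a :: as, [] => a :: as
  | a :: as, b :: bs => if a = b then pvFdiff as bs else a :: pvFdiff as bs

-- mismatched chars of the common prefix (what A's first loop collects)
def pvMism : List Char → List Char → List Char
  | [], _ => []
  | _ :: _, [] => []
  | a :: as, b :: bs => if a = b then pvMism as bs else a :: pvMism as bs

theorem pvFdiff_eq (t t1 : List Char) :
    pvFdiff t t1 = pvMism t t1 ++ t.drop (min t.length t1.length) ++ t1.drop (min t.length t1.length) := by
  induction t generalizing t1 with
  | nil => cases t1 <;> simp [pvFdiff, pvMism]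
  | cons a as ih =>
    cases t1 with
    | nil => simp [pvFdiff, pvMism]
    | cons b bs =>
      simp only [pvFdiff, pvMism, List.length_cons, Nat.succ_min_succ, List.drop_succ_cons, ih bs]
      split <;> simp

-- A's index loop over the common prefix, as a recursion on both lists
theorem pvAfold (t t1 : List Char) (acc : List Char) :
    (List.range (min t.length t1.length)).foldl
      (fun acc i => if t.getD i ' ' = t1.getD i ' ' then acc else acc ++ [t.getD i ' ']) acc
      = acc ++ pvMism t t1 := by
  induction t generalizing t1 acc with
  | nil => cases t1 <;> simp [pvMism]
  | cons a as ih =>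
    cases t1 with
    | nil => simp [pvMism]
    | cons b bs =>
      simp only [List.length_cons, Nat.succ_min_succ, List.range_succ_eq_map, List.foldl_cons,
        List.foldl_map, List.getD_cons_succ, List.getD_cons_zero]
      by_cases hab : a = b
      · rw [if_pos hab, ih bs]
        simp [pvMism, hab]
      · rw [if_neg hab, ih bs]
        simp [pvMism, hab]

-- B's pass when the left string is exhausted: every step appends the right char
theorem pvBnil (t1 : List Char) (acc : List Char) :
    (List.range t1.length).foldl
      (fun acc i =>
        if ((none : Option Char)) = (if i < t1.length then some (t1.getD i ' ') else none) then acc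
        else acc ++ [((none : Option Char)).getD
          (((if i < t1.length then some (t1.getD i ' ') else none) : Option Char).getD ' ')]) acc
      = acc ++ t1 := by
  induction t1 generalizing acc with
  | nil => simp
  | cons c cs ih =>
    simp only [List.length_cons, List.range_succ_eq_map, List.foldl_cons, List.foldl_map,
      List.getD_cons_succ, List.getD_cons_zero, Nat.zero_lt_succ, if_true, Nat.succ_lt_succ_iff]
    rw [if_neg (by simp), ih]
    simp

-- B's pass when the right string is exhausted
theorem pvBsing (t : List Char) (acc : List Char) :
    (List.range t.length).foldl
      (fun acc i =>
        if (if i < t.length then some (t.getD i ' ') else none) = ((none : Option Char)) then acc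
        else acc ++ [(((if i < t.length then some (t.getD i ' ') else none) : Option Char)).getD
          (((none : Option Char)).getD ' ')]) acc
      = acc ++ t := by
  induction t generalizing acc with
  | nil => simp
  | cons c cs ih =>
    simp only [List.length_cons, List.range_succ_eq_map, List.foldl_cons, List.foldl_map,
      List.getD_cons_succ, List.getD_cons_zero, Nat.zero_lt_succ, if_true, Nat.succ_lt_succ_iff]
    rw [if_neg (by simp), ih]
    simp

-- B's single padded pass, as a recursion on both lists
theorem pvBfold (t t1 : List Char) (acc : List Char) :
    (List.range (max t.length t1.length)).foldl
      (fun acc i =>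
        if (if i < t.length then some (t.getD i ' ') else none)
            = (if i < t1.length then some (t1.getD i ' ') else none) then acc
        else acc ++ [((if i < t.length then some (t.getD i ' ') else none) : Option Char).getD
                       (((if i < t1.length then some (t1.getD i ' ') else none) : Option Char).getD ' ')]) acc
      = acc ++ pvFdiff t t1 := by
  induction t generalizing t1 acc with
  | nil =>
    simp only [List.length_nil, Nat.max_eq_right (Nat.zero_le _), pvFdiff, Nat.not_lt_zero,
      if_false]
    exact pvBnil t1 acc
  | cons a as ih =>
    cases t1 with
    | nil =>
      simp only [List.length_nil, Nat.max_eq_left (Nat.zero_le _), pvFdiff, Nat.not_lt_zero,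
        if_false]
      exact pvBsing (a :: as) acc
    | cons b bs =>
      simp only [List.length_cons, Nat.succ_max_succ, List.range_succ_eq_map, List.foldl_cons,
        List.foldl_map, List.getD_cons_succ, List.getD_cons_zero, Nat.zero_lt_succ, if_true,
        Nat.succ_lt_succ_iff, pvFdiff]
      by_cases hab : a = b
      · rw [if_pos (by simp [hab]), ih bs, if_pos hab]
      · rw [if_neg (by simp [hab]), ih bs, if_neg hab]
        simp

theorem pvA_eq (t t1 : List Char) :
    str_difference (String.ofList t) (String.ofList t1) = String.ofList (pvFdiff t t1) := by
  unfold str_difference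
  simp only [String.toList_ofList, PySem.List.pyRange_zero_nat, List.foldl_map,
    PySem.List.pyGetD_natCast, PySem.List.slice_some_none, PySem.List.clampIdx_natCast, ne_eq,
    ite_not]
  rw [pvAfold, pvFdiff_eq]
  rcases Nat.lt_trichotomy t.length t1.length with h | h | h
  · rw [if_neg (by omega), if_pos h]
    have h1 : min (min t.length t1.length) t1.length = min t.length t1.length := by omega
    have h2 : t.drop (min t.length t1.length) = [] := List.drop_eq_nil_of_le (by omega)
    rw [h1, h2]; simp
  · rw [if_neg (by omega), if_neg (by omega)]
    have h2 : t.drop (min t.length t1.length) = [] := List.drop_eq_nil_of_le (by omega)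
    have h3 : t1.drop (min t.length t1.length) = [] := List.drop_eq_nil_of_le (by omega)
    rw [h2, h3]; simp
  · rw [if_pos h]
    have h1 : min (min t.length t1.length) t.length = min t.length t1.length := by omega
    have h3 : t1.drop (min t.length t1.length) = [] := List.drop_eq_nil_of_le (by omega)
    rw [h1, h3]; simp

theorem pvB_eq (t t1 : List Char) :
    str_difference_alt (String.ofList t) (String.ofList t1) = String.ofList (pvFdiff t t1) := by
  unfold str_difference_alt
  simp only [String.toList_ofList, ← Nat.cast_max, PySem.List.pyRange_zero_nat, List.foldl_map,
    PySem.List.pyGetD_natCast, Nat.cast_lt, ne_eq, ite_not]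
  rw [pvBfold]
  simp

-- ===== VERDICT (by name: the statement is the Claim_ definition above) =====
theorem str_difference_spec : Claim_equal_str_difference := by
  intro s s1 _
  unfold Spec_str_difference
  rw [show s = String.ofList s.toList by simp, show s1 = String.ofList s1.toList by simp,
    pvA_eq, pvB_eq]
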